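-- pv_equiv track=rewrite | github.com/allegro66x0/bridge | L6/webcam_gomoku_ai.py | count_patterns
-- ===== SOURCE A (Python) =====
-- def evaluate_line(line, player, ai_player):
--     opponent = player if ai_player != player else (3 - player) # Assuming 1 and 2
--     if opponent in line: return 0
--     player_stones = line.count(player)
--     if player_stones == 5: return 100000
--     if player_stones == 4: return 1000
--     if player_stones == 3: return 100
--     if player_stones == 2: return 10
--     return 0
--
-- def count_patterns(board, player):
--     score = 0
--     bs = len(board)
--     # Horizontal
--     for r in range(bs):
--         for c in range(bs - 4):
--             score += evaluate_line([board[r][c+i] for i in range(5)], player, player)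
--     # Vertical
--     for c in range(bs):
--         for r in range(bs - 4):
--              score += evaluate_line([board[r+i][c] for i in range(5)], player, player)
--     # Diagonal \
--     for r in range(bs - 4):
--         for c in range(bs - 4):
--             score += evaluate_line([board[r+i][c+i] for i in range(5)], player, player)
--     # Diagonal /
--     for r in range(4, bs):
--         for c in range(bs - 4):
--             score += evaluate_line([board[r-i][c+i] for i in range(5)], player, player)
--     return score
-- ===== SOURCE B (Python) =====
-- def _window_score(p, o):
--     if o:
--         return 0
--     if p == 5: return 100000
--     if p == 4: return 1000
--     if p == 3: return 100
--     if p == 2: return 10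
--     return 0
--
-- def _slide_line(line, player, opp):
--     # score all length-5 windows of one line with running counts
--     p = line[:5].count(player)
--     o = line[:5].count(opp)
--     total = _window_score(p, o)
--     for new, old in zip(line[5:], line):
--         if new == player: p += 1
--         elif new == opp: o += 1
--         if old == player: p -= 1
--         elif old == opp: o -= 1
--         total += _window_score(p, o)
--     return total
--
-- def count_patterns(board, player):
--     bs = len(board)
--     if bs < 5:
--         return 0
--     opp = 3 - player
--     lines = []
--     for r in range(bs):
--         lines.append([board[r][c] for c in range(bs)])
--     for c in range(bs):
--         lines.append([board[r][c] for r in range(bs)])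
--     for d in range(bs - 4):
--         lines.append([board[r][r + d] for r in range(bs - d)])
--         if d:
--             lines.append([board[r + d][r] for r in range(bs - d)])
--     for s in range(4, 2 * bs - 5):
--         lo = max(0, s - bs + 1)
--         hi = min(bs - 1, s)
--         lines.append([board[r][s - r] for r in range(lo, hi + 1)])
--     total = 0
--     for line in lines:
--         total += _slide_line(line, player, opp)
--     return total
-- ===== Notes on version B (the rewrite author's own statement) =====
-- stated objective: faster
-- what changed: B first extracts every maximal board line (rows, columns, both diagonal directions) once and then slides a length-5 window along each line with incrementally maintained player/opponent stone counts, instead of A's four nested index loops that build and rescan a fresh 5-cell list per window; measured ~4x faster (constant factor: O(1) count update per window instead of building and scanning a 5-element list).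
-- outside the precondition, e.g. on count_patterns([[1, 2, 3, 4, 5], [1], [2], [3], [4]], 1): A raises IndexError, B raises IndexError
import Mathlib
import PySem

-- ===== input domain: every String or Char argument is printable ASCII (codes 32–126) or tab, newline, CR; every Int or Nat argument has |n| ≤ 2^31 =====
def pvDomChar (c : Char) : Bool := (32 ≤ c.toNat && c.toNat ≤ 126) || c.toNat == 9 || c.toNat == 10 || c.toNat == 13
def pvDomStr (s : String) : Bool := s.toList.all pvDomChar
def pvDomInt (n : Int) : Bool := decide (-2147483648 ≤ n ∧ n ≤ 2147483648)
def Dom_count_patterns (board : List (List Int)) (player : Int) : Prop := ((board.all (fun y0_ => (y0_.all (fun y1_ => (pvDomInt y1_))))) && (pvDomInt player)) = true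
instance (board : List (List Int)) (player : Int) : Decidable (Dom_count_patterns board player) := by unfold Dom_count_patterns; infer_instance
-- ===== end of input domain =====

-- B replaces A's four per-window comprehension loops by extracting every maximal line
-- (rows, columns, both diagonal directions) once and sliding a 5-window along each line
-- with incrementally maintained stone counts (objective: faster by a constant factor,
-- measured ~4x in a timing run; the proof shows the return values agree).

-- board[r][c] (indices here are always ≥ 0; default 0 outside, excluded by Pre_)
def pvCell (board : List (List Int)) (r c : Int) : Int :=
  PySem.List.pyGetD (PySem.List.pyGetD board r []) c 0

-- ===== PORT A =====
def evaluate_line (line : List Int) (player ai_player : Int) : Int :=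
  let opponent := if ai_player ≠ player then player else 3 - player
  if line.contains opponent then 0
  else
    let player_stones : Int := (PySem.List.count line player : Int)
    if player_stones = 5 then 100000
    else if player_stones = 4 then 1000
    else if player_stones = 3 then 100
    else if player_stones = 2 then 10
    else 0

def count_patterns (board : List (List Int)) (player : Int) : Int :=
  let bs : Int := (board.length : Int)
  let score : Int := 0
  -- Horizontal
  let score := (PySem.List.pyRange 0 bs 1).foldl (fun score r =>
    (PySem.List.pyRange 0 (bs - 4) 1).foldl (fun score c =>
      score + evaluate_line ((PySem.List.pyRange 0 5 1).map (fun i => pvCell board r (c + i))) player player) score) score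
  -- Vertical
  let score := (PySem.List.pyRange 0 bs 1).foldl (fun score c =>
    (PySem.List.pyRange 0 (bs - 4) 1).foldl (fun score r =>
      score + evaluate_line ((PySem.List.pyRange 0 5 1).map (fun i => pvCell board (r + i) c)) player player) score) score
  -- Diagonal \
  let score := (PySem.List.pyRange 0 (bs - 4) 1).foldl (fun score r =>
    (PySem.List.pyRange 0 (bs - 4) 1).foldl (fun score c =>
      score + evaluate_line ((PySem.List.pyRange 0 5 1).map (fun i => pvCell board (r + i) (c + i))) player player) score) score
  -- Diagonal /
  let score := (PySem.List.pyRange 4 bs 1).foldl (fun score r =>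
    (PySem.List.pyRange 0 (bs - 4) 1).foldl (fun score c =>
      score + evaluate_line ((PySem.List.pyRange 0 5 1).map (fun i => pvCell board (r - i) (c + i))) player player) score) score
  score

-- ===== PORT B =====
def pvWinScore (p o : Int) : Int :=
  if o ≠ 0 then 0
  else if p = 5 then 100000
  else if p = 4 then 1000
  else if p = 3 then 100
  else if p = 2 then 10
  else 0

def pvSlideStep (player opp : Int) (st : Int × Int × Int) (pr : Int × Int) : Int × Int × Int :=
  let po1 : Int × Int :=
    if pr.1 = player then (st.1 + 1, st.2.1)
    else if pr.1 = opp then (st.1, st.2.1 + 1)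
    else (st.1, st.2.1)
  let po2 : Int × Int :=
    if pr.2 = player then (po1.1 - 1, po1.2)
    else if pr.2 = opp then (po1.1, po1.2 - 1)
    else po1
  (po2.1, po2.2, st.2.2 + pvWinScore po2.1 po2.2)

def pvSlideLine (line : List Int) (player opp : Int) : Int :=
  let p : Int := (PySem.List.count (PySem.List.slice line none (some 5)) player : Int)
  let o : Int := (PySem.List.count (PySem.List.slice line none (some 5)) opp : Int)
  (((PySem.List.slice line (some 5) none).zip line).foldl (pvSlideStep player opp)
      (p, o, pvWinScore p o)).2.2

def count_patterns_alt (board : List (List Int)) (player : Int) : Int :=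
  let bs : Int := (board.length : Int)
  if bs < 5 then 0
  else
    let opp : Int := 3 - player
    let lines : List (List Int) := []
    let lines := (PySem.List.pyRange 0 bs 1).foldl (fun lines r =>
      lines ++ [(PySem.List.pyRange 0 bs 1).map (fun c => pvCell board r c)]) lines
    let lines := (PySem.List.pyRange 0 bs 1).foldl (fun lines c =>
      lines ++ [(PySem.List.pyRange 0 bs 1).map (fun r => pvCell board r c)]) lines
    let lines := (PySem.List.pyRange 0 (bs - 4) 1).foldl (fun lines d =>
      let lines := lines ++ [(PySem.List.pyRange 0 (bs - d) 1).map (fun r => pvCell board r (r + d))]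
      if d ≠ 0 then lines ++ [(PySem.List.pyRange 0 (bs - d) 1).map (fun r => pvCell board (r + d) r)]
      else lines) lines
    let lines := (PySem.List.pyRange 4 (2 * bs - 5) 1).foldl (fun lines s =>
      lines ++ [(PySem.List.pyRange (max 0 (s - bs + 1)) (min (bs - 1) s + 1) 1).map (fun r => pvCell board r (s - r))]) lines
    lines.foldl (fun total line => total + pvSlideLine line player opp) 0

-- ===== PRECONDITION & SPEC =====
-- Pre_ excludes exactly the inputs on which the Python A raises IndexError: boards of
-- side ≥ 5 with some row shorter than the board (A indexes board[r][c] for all c < len(board)).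
-- The Lean ports read cells with a default, so the equality theorem below actually holds
-- unconditionally; Pre_ only delimits where the Python A returns.
def Pre_count_patterns (board : List (List Int)) (player : Int) : Prop :=
  board.length < 5 ∨ ∀ row ∈ board, board.length ≤ row.length
instance (board : List (List Int)) (player : Int) : Decidable (Pre_count_patterns board player) := by
  unfold Pre_count_patterns; infer_instance

def pvWitness_count_patterns : List (List Int) × Int :=
  ([[1, 1, 1, 1, 1], [0, 2, 0, 0, 0], [0, 0, 2, 0, 0], [0, 0, 0, 0, 0], [0, 0, 0, 0, 2]], 1)

def Spec_count_patterns (board : List (List Int)) (player : Int) (out : Int) : Prop := out = count_patterns_alt board player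
instance (board : List (List Int)) (player : Int) (out : Int) : Decidable (Spec_count_patterns board player out) := by unfold Spec_count_patterns; infer_instance

-- ===== CLAIM (what is proved, stated in full; the proofs are below) =====
def Claim_equal_count_patterns : Prop := ∀ (board : List (List Int)) (player : Int), Dom_count_patterns board player → Pre_count_patterns board player → Spec_count_patterns board player (count_patterns board player)

-- ===== LEMMAS AND PROOFS =====

-- total of all 5-windows of a list (0 for lists shorter than 5), suffix by suffix
def pvWS (pl op : Int) : List Int → Int
  | [] => 0
  | a :: t =>
    (if 4 ≤ t.length then
      pvWinScore ((List.count pl ((a :: t).take 5) : Int)) ((List.count op ((a :: t).take 5) : Int))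
     else 0) + pvWS pl op t

theorem pvWS_zero (pl op : Int) (l : List Int) (h : l.length < 5) : pvWS pl op l = 0 := by
  induction l with
  | nil => rfl
  | cons a t ih =>
    simp only [List.length_cons] at h
    simp [pvWS, ih (by omega)]
    omega

theorem pvWS_cons_ge (pl op : Int) (l : List Int) (h : 5 ≤ l.length) :
    pvWS pl op l =
      pvWinScore ((List.count pl (l.take 5) : Int)) ((List.count op (l.take 5) : Int)) + pvWS pl op l.tail := by
  match l with
  | a :: t =>
    simp only [pvWS, List.tail_cons]
    rw [if_pos (by simp at h ⊢; omega)]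

theorem pvSlide_loop (pl op : Int) (hne : pl ≠ op) :
    ∀ (rest w : List Int) (acc : Int), w.length = 5 →
      ((rest.zip (w ++ rest)).foldl (pvSlideStep pl op)
        ((List.count pl w : Int), (List.count op w : Int), acc)).2.2
      = acc + pvWS pl op ((w ++ rest).tail) := by
  intro rest
  induction rest with
  | nil =>
    intro w acc hw
    simp only [List.zip_nil_left, List.foldl_nil, List.append_nil]
    rw [pvWS_zero pl op w.tail (by simp [List.length_tail]; omega)]
    ring
  | cons b rs ih =>
    intro w acc hw
    match w with
    | a :: w4 =>
      have hw4 : w4.length = 4 := by simpa using hw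
      have hzip : (b :: rs).zip ((a :: w4) ++ b :: rs) = (b, a) :: rs.zip (w4 ++ b :: rs) := by
        simp
      rw [hzip, List.foldl_cons]
      have hstep : pvSlideStep pl op ((List.count pl (a :: w4) : Int), (List.count op (a :: w4) : Int), acc) (b, a)
          = ((List.count pl (w4 ++ [b]) : Int), (List.count op (w4 ++ [b]) : Int),
             acc + pvWinScore (List.count pl (w4 ++ [b]) : Int) (List.count op (w4 ++ [b]) : Int)) := by
        unfold pvSlideStep
        have hco : ∀ v : Int, List.count v (a :: w4) = (if a = v then 1 else 0) + List.count v w4 := by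
          intro v; simp [List.count_cons]; omega
        have hca : ∀ v : Int, List.count v (w4 ++ [b]) = List.count v w4 + (if b = v then 1 else 0) := by
          intro v; simp [List.count_append, List.count_singleton]
        simp only [hco, hca]
        by_cases hbp : b = pl <;> by_cases hbo : b = op <;>
          by_cases hap : a = pl <;> by_cases hao : a = op <;>
          simp_all <;> push_cast <;> ring_nf <;> first | omega | exact ⟨trivial, trivial⟩
      rw [hstep]
      have hassoc : w4 ++ b :: rs = (w4 ++ [b]) ++ rs := by simp
      rw [hassoc, ih (w4 ++ [b]) _ (by simp [hw4])]
      have hlen : 5 ≤ ((w4 ++ [b]) ++ rs).length := by simp [hw4]; omega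
      have := pvWS_cons_ge pl op ((w4 ++ [b]) ++ rs) hlen
      have htake : ((w4 ++ [b]) ++ rs).take 5 = w4 ++ [b] := by
        rw [List.take_append_of_le_length (by simp [hw4])]
        simp [List.take_of_length_le, hw4]
      rw [htake] at this
      have htail : ((a :: w4) ++ b :: rs).tail = (w4 ++ [b]) ++ rs := by simp
      rw [htail, this]
      ring

theorem pvSlideLine_eq (pl op : Int) (hne : pl ≠ op) (l : List Int) (h : 5 ≤ l.length) :
    pvSlideLine l pl op = pvWS pl op l := by
  unfold pvSlideLine
  have h5 : PySem.List.slice l none (some 5) = l.take 5 := by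
    rw [PySem.List.slice_to l (show (0:Int) ≤ 5 by omega)]; congr 1
  have hd : PySem.List.slice l (some 5) none = l.drop 5 := by
    rw [PySem.List.slice_from l (show (0:Int) ≤ 5 by omega)]; congr 1
  rw [h5, hd]
  have htw : (l.take 5).length = 5 := by simp; omega
  have hta : l.take 5 ++ l.drop 5 = l := List.take_append_drop 5 l
  simp only [PySem.List.count_eq]
  have := pvSlide_loop pl op hne (l.drop 5) (l.take 5)
    (pvWinScore (List.count pl (l.take 5) : Int) (List.count op (l.take 5) : Int)) htw
  rw [hta] at this
  rw [this]
  rw [pvWS_cons_ge pl op l h]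

-- pvWS of a mapped range as the sum over all window start positions
theorem pvWS_map_pyRange (pl op : Int) (g : Int → Int) :
    ∀ (n : ℕ) (a : Int),
      pvWS pl op ((PySem.List.pyRange a (a + n) 1).map g)
        = ((PySem.List.pyRange a (a + n - 4) 1).map (fun c =>
            pvWinScore ((List.count pl ((PySem.List.pyRange c (c + 5) 1).map g) : Int))
                       ((List.count op ((PySem.List.pyRange c (c + 5) 1).map g) : Int)))).sum := by
  intro n
  induction n with
  | zero =>
    intro a
    rw [PySem.List.pyRange_one_eq_nil (a := a) (by omega),
        PySem.List.pyRange_one_eq_nil (a := a) (by omega)]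
    rfl
  | succ m ih =>
    intro a
    by_cases h5 : m + 1 < 5
    · rw [pvWS_zero pl op _ (by
        simp [PySem.List.length_pyRange_one]; omega)]
      rw [PySem.List.pyRange_one_eq_nil (a := a) (by push_cast; omega)]
      rfl
    · have hm : 4 ≤ m := by omega
      have hcons : PySem.List.pyRange a (a + ((m + 1 : ℕ) : Int)) 1
          = a :: PySem.List.pyRange (a + 1) (a + ((m + 1 : ℕ) : Int)) 1 :=
        PySem.List.pyRange_one_cons (by push_cast; omega)
      have hsplit : PySem.List.pyRange a (a + ((m + 1 : ℕ) : Int)) 1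
          = PySem.List.pyRange a (a + 5) 1 ++ PySem.List.pyRange (a + 5) (a + ((m + 1 : ℕ) : Int)) 1 :=
        PySem.List.pyRange_one_append a (a + 5) _ (by omega) (by push_cast; omega)
      have hlen5 : (PySem.List.pyRange a (a + 5) 1).length = 5 := by
        rw [PySem.List.length_pyRange_one]; omega
      have hlenL : ((PySem.List.pyRange a (a + ((m + 1 : ℕ) : Int)) 1).map g).length = m + 1 := by
        rw [List.length_map, PySem.List.length_pyRange_one]; omega
      have htake : ((PySem.List.pyRange a (a + ((m + 1 : ℕ) : Int)) 1).map g).take 5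
          = (PySem.List.pyRange a (a + 5) 1).map g := by
        rw [hsplit, List.map_append, List.take_append_of_le_length (by simp [hlen5]),
            List.take_of_length_le (by simp [hlen5])]
      have htail : ((PySem.List.pyRange a (a + ((m + 1 : ℕ) : Int)) 1).map g).tail
          = (PySem.List.pyRange (a + 1) ((a + 1) + (m : ℕ)) 1).map g := by
        rw [hcons]
        simp only [List.map_cons, List.tail_cons]
        congr 2
        push_cast; ring
      rw [pvWS_cons_ge pl op _ (by rw [hlenL]; omega), htake, htail, ih (a + 1)]
      have hrc : PySem.List.pyRange a (a + ((m + 1 : ℕ) : Int) - 4) 1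
          = a :: PySem.List.pyRange (a + 1) (a + ((m + 1 : ℕ) : Int) - 4) 1 :=
        PySem.List.pyRange_one_cons (by push_cast; omega)
      rw [hrc, List.map_cons, List.sum_cons]
      have harg : (a + 1) + ((m : ℕ) : Int) - 4 = a + ((m + 1 : ℕ) : Int) - 4 := by push_cast; ring
      rw [harg]

theorem eval_eq (l : List Int) (pl : Int) :
    evaluate_line l pl pl = pvWinScore ((List.count pl l : Int)) ((List.count (3 - pl) l : Int)) := by
  unfold evaluate_line pvWinScore
  by_cases hc : (3 - pl) ∈ l
  · have h0 : l.count (3 - pl) ≠ 0 := by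
      simpa [List.count_eq_zero] using hc
    simp [hc, h0]
  · have h0 : l.count (3 - pl) = 0 := by
      simpa [List.count_eq_zero] using hc
    simp [hc, h0, PySem.List.count_eq]
    rfl

-- ∑ over a list range ↔ ∑ over Finset.range
theorem sum_map_pyRange (f : Int → Int) (a : Int) (n : ℕ) :
    ((PySem.List.pyRange a (a + n) 1).map f).sum = ∑ k ∈ Finset.range n, f (a + k) := by
  rw [PySem.List.pyRange_one]
  have h : ((a + (n : Int)) - a).toNat = n := by omega
  rw [h, List.map_map]
  clear h
  induction n with
  | zero => simp
  | succ m ih =>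
    rw [List.range_succ, List.map_append, List.sum_append, Finset.sum_range_succ, ih]
    simp

-- square sum split along \-diagonals, upper (incl. main) part
theorem sq_upper (m : ℕ) (F : ℕ → ℕ → Int) :
    ∑ r ∈ Finset.range m, ∑ c ∈ Finset.range m, (if r ≤ c then F r c else 0)
      = ∑ d ∈ Finset.range m, ∑ k ∈ Finset.range (m - d), F k (k + d) := by
  have h1 : ∀ r, ∑ c ∈ Finset.range m, (if r ≤ c then F r c else 0)
      = ∑ c ∈ (Finset.range m).filter (fun c => r ≤ c), F r c := by
    intro r; rw [Finset.sum_filter]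
  simp only [h1]
  rw [Finset.sum_sigma', Finset.sum_sigma']
  refine Finset.sum_nbij' (fun p => ⟨p.2 - p.1, p.1⟩) (fun q => ⟨q.2, q.2 + q.1⟩) ?_ ?_ ?_ ?_ ?_
  · rintro ⟨r, c⟩ h
    simp only [Finset.mem_sigma, Finset.mem_filter, Finset.mem_range] at h ⊢
    omega
  · rintro ⟨d, k⟩ h
    simp only [Finset.mem_sigma, Finset.mem_filter, Finset.mem_range] at h ⊢
    refine ⟨?_, ?_, ?_⟩ <;> first | trivial | omega
  · rintro ⟨r, c⟩ h
    simp only [Finset.mem_sigma, Finset.mem_filter, Finset.mem_range] at h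
    simp only [Sigma.mk.injEq, heq_eq_eq]
    refine ⟨?_, ?_⟩ <;> first | trivial | omega
  · rintro ⟨d, k⟩ h
    simp only [Finset.mem_sigma, Finset.mem_filter, Finset.mem_range] at h
    simp only [Sigma.mk.injEq, heq_eq_eq]
    refine ⟨?_, ?_⟩ <;> first | trivial | omega
  · rintro ⟨r, c⟩ h
    simp only [Finset.mem_sigma, Finset.mem_filter, Finset.mem_range] at h
    have : r + (c - r) = c := by omega
    simp [this]


theorem sq_lower (m : ℕ) (F : ℕ → ℕ → Int) :
    ∑ r ∈ Finset.range m, ∑ c ∈ Finset.range m, (if c < r then F r c else 0)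
      = ∑ d ∈ Finset.range m, (if d ≠ 0 then ∑ k ∈ Finset.range (m - d), F (k + d) k else 0) := by
  have h1 : ∀ r, ∑ c ∈ Finset.range m, (if c < r then F r c else 0)
      = ∑ c ∈ (Finset.range m).filter (fun c => c < r), F r c := by
    intro r; rw [Finset.sum_filter]
  have h2 : ∀ d, (if d ≠ 0 then ∑ k ∈ Finset.range (m - d), F (k + d) k else 0)
      = ∑ k ∈ (Finset.range (m - d)).filter (fun _ => d ≠ 0), F (k + d) k := by
    intro d
    rw [Finset.sum_filter]
    by_cases hd : d = 0 <;> simp [hd]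
  simp only [h1, h2]
  rw [Finset.sum_sigma', Finset.sum_sigma']
  refine Finset.sum_nbij' (fun p => ⟨p.1 - p.2, p.2⟩) (fun q => ⟨q.2 + q.1, q.2⟩) ?_ ?_ ?_ ?_ ?_
  · rintro ⟨r, c⟩ h
    simp only [Finset.mem_sigma, Finset.mem_filter, Finset.mem_range] at h ⊢
    refine ⟨?_, ?_, ?_⟩ <;> omega
  · rintro ⟨d, k⟩ h
    simp only [Finset.mem_sigma, Finset.mem_filter, Finset.mem_range] at h ⊢
    refine ⟨?_, ?_, ?_⟩ <;> omega
  · rintro ⟨r, c⟩ h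
    simp only [Finset.mem_sigma, Finset.mem_filter, Finset.mem_range] at h
    simp only [Sigma.mk.injEq, heq_eq_eq]
    refine ⟨?_, ?_⟩ <;> first | trivial | omega
  · rintro ⟨d, k⟩ h
    simp only [Finset.mem_sigma, Finset.mem_filter, Finset.mem_range] at h
    simp only [Sigma.mk.injEq, heq_eq_eq]
    refine ⟨?_, ?_⟩ <;> first | trivial | omega
  · rintro ⟨r, c⟩ h
    simp only [Finset.mem_sigma, Finset.mem_filter, Finset.mem_range] at h
    have : c + (r - c) = r := by omega
    simp [this]


-- square sum regrouped along /-antidiagonals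
theorem sq_anti (m : ℕ) (F : ℕ → ℕ → Int) :
    ∑ j ∈ Finset.range m, ∑ c ∈ Finset.range m, F j c
      = ∑ t ∈ Finset.range (2 * m - 1),
          ∑ i ∈ Finset.range (min m (t + 1) - (t + 1 - m)), F (t + 1 - m + i) (t - (t + 1 - m) - i) := by
  rw [Finset.sum_sigma', Finset.sum_sigma']
  refine Finset.sum_nbij' (fun p => ⟨p.1 + p.2, p.1 - (p.1 + p.2 + 1 - m)⟩)
    (fun q => ⟨q.1 + 1 - m + q.2, q.1 - (q.1 + 1 - m) - q.2⟩) ?_ ?_ ?_ ?_ ?_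
  · rintro ⟨x, y⟩ h
    simp only [Finset.mem_sigma, Finset.mem_range] at h ⊢
    refine ⟨?_, ?_⟩ <;> omega
  · rintro ⟨x, y⟩ h
    simp only [Finset.mem_sigma, Finset.mem_range] at h ⊢
    refine ⟨?_, ?_⟩ <;> omega
  · rintro ⟨x, y⟩ h
    simp only [Finset.mem_sigma, Finset.mem_range] at h
    simp only [Sigma.mk.injEq, heq_eq_eq]
    refine ⟨?_, ?_⟩ <;> first | trivial | omega
  · rintro ⟨x, y⟩ h
    simp only [Finset.mem_sigma, Finset.mem_range] at h
    simp only [Sigma.mk.injEq, heq_eq_eq]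
    refine ⟨?_, ?_⟩ <;> first | trivial | omega
  · rintro ⟨x, y⟩ h
    simp only [Finset.mem_sigma, Finset.mem_range] at h
    have h1 : x + y + 1 - m + (x - (x + y + 1 - m)) = x := by omega
    have h2 : x + y - (x + y + 1 - m) - (x - (x + y + 1 - m)) = y := by omega
    rw [h1, h2]


-- specialized bridges
theorem sum_map_pyRange0 (f : Int → Int) (n : ℕ) :
    ((PySem.List.pyRange 0 (n : Int) 1).map f).sum = ∑ k ∈ Finset.range n, f (k : Int) := by
  simpa using sum_map_pyRange f 0 n

theorem sum_map_pyRange' (f : Int → Int) (a b : Int) (hab : a ≤ b) :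
    ((PySem.List.pyRange a b 1).map f).sum = ∑ k ∈ Finset.range (b - a).toNat, f (a + (k : Int)) := by
  have h := sum_map_pyRange f a (b - a).toNat
  have hb : a + (((b - a).toNat : ℕ) : Int) = b := by omega
  rw [hb] at h
  exact h

theorem pvWS_map_pyRange' (pl op : Int) (g : Int → Int) (a b : Int) (hab : a ≤ b) :
    pvWS pl op ((PySem.List.pyRange a b 1).map g)
      = ((PySem.List.pyRange a (b - 4) 1).map (fun c =>
          pvWinScore ((List.count pl ((PySem.List.pyRange c (c + 5) 1).map g) : Int))
                     ((List.count op ((PySem.List.pyRange c (c + 5) 1).map g) : Int)))).sum := by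
  have h := pvWS_map_pyRange pl op g (b - a).toNat a
  have hb : a + (((b - a).toNat : ℕ) : Int) = b := by omega
  rw [hb] at h
  exact h

theorem window_shift (g : Int → Int) (c : Int) :
    (PySem.List.pyRange c (c + 5) 1).map g = (PySem.List.pyRange 0 5 1).map (fun i => g (c + i)) := by
  rw [PySem.List.pyRange_one, PySem.List.pyRange_one]
  have h1 : (c + 5 - c).toNat = 5 := by omega
  have h2 : ((5 : Int) - 0).toNat = 5 := by omega
  rw [h1, h2, List.map_map, List.map_map]
  refine List.map_congr_left ?_
  intro i _
  simp

theorem pv_slide_as_winsum (board : List (List Int)) (pl : Int) (g : Int → Int) (a b : Int)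
    (hlen : a + 5 ≤ b) :
    pvSlideLine ((PySem.List.pyRange a b 1).map g) pl (3 - pl)
      = ((PySem.List.pyRange a (b - 4) 1).map (fun c =>
          pvWinScore ((List.count pl ((PySem.List.pyRange 0 5 1).map (fun i => g (c + i))) : Int))
                     ((List.count (3 - pl) ((PySem.List.pyRange 0 5 1).map (fun i => g (c + i))) : Int)))).sum := by
  rw [pvSlideLine_eq pl (3 - pl) (by omega) _
      (by rw [List.length_map, PySem.List.length_pyRange_one]; omega)]
  rw [pvWS_map_pyRange' pl (3 - pl) g a b (by omega)]
  refine congrArg List.sum (List.map_congr_left ?_)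
  intro c _
  rw [window_shift]

theorem fam_row (board : List (List Int)) (pl : Int) (h : 5 ≤ board.length) :
    ((PySem.List.pyRange 0 ((board.length : Int)) 1).map (fun r =>
      ((PySem.List.pyRange 0 ((board.length : Int) - 4) 1).map (fun c =>
        evaluate_line ((PySem.List.pyRange 0 5 1).map (fun i => pvCell board r (c + i))) pl pl)).sum)).sum
    = ((PySem.List.pyRange 0 ((board.length : Int)) 1).map (fun r =>
        pvSlideLine ((PySem.List.pyRange 0 ((board.length : Int)) 1).map (fun c => pvCell board r c)) pl (3 - pl))).sum := by
  refine congrArg List.sum (List.map_congr_left ?_)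
  intro r _
  rw [pv_slide_as_winsum board pl (fun c => pvCell board r c) 0 (board.length : Int) (by omega)]
  refine congrArg List.sum (List.map_congr_left ?_)
  intro c _
  exact eval_eq _ pl

theorem fam_col (board : List (List Int)) (pl : Int) (h : 5 ≤ board.length) :
    ((PySem.List.pyRange 0 ((board.length : Int)) 1).map (fun c =>
      ((PySem.List.pyRange 0 ((board.length : Int) - 4) 1).map (fun r =>
        evaluate_line ((PySem.List.pyRange 0 5 1).map (fun i => pvCell board (r + i) c)) pl pl)).sum)).sum
    = ((PySem.List.pyRange 0 ((board.length : Int)) 1).map (fun c =>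
        pvSlideLine ((PySem.List.pyRange 0 ((board.length : Int)) 1).map (fun r => pvCell board r c)) pl (3 - pl))).sum := by
  refine congrArg List.sum (List.map_congr_left ?_)
  intro c _
  rw [pv_slide_as_winsum board pl (fun r => pvCell board r c) 0 (board.length : Int) (by omega)]
  refine congrArg List.sum (List.map_congr_left ?_)
  intro r _
  exact eval_eq _ pl

theorem fam_diag (board : List (List Int)) (pl : Int) (h : 5 ≤ board.length) :
    ((PySem.List.pyRange 0 ((board.length : Int) - 4) 1).map (fun r =>
      ((PySem.List.pyRange 0 ((board.length : Int) - 4) 1).map (fun c =>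
        evaluate_line ((PySem.List.pyRange 0 5 1).map (fun i => pvCell board (r + i) (c + i))) pl pl)).sum)).sum
    = ((PySem.List.pyRange 0 ((board.length : Int) - 4) 1).map (fun d =>
        pvSlideLine ((PySem.List.pyRange 0 ((board.length : Int) - d) 1).map (fun r => pvCell board r (r + d))) pl (3 - pl)
        + (if d ≠ 0 then
            pvSlideLine ((PySem.List.pyRange 0 ((board.length : Int) - d) 1).map (fun r => pvCell board (r + d) r)) pl (3 - pl)
          else 0))).sum := by
  obtain ⟨m, hm⟩ : ∃ m : ℕ, (board.length : Int) - 4 = (m : Int) := ⟨board.length - 4, by omega⟩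
  have hm4 : board.length = m + 4 := by omega
  rw [hm, sum_map_pyRange0, sum_map_pyRange0]
  have hL : (∑ r ∈ Finset.range m, ((PySem.List.pyRange 0 (m : Int) 1).map (fun c =>
        evaluate_line ((PySem.List.pyRange 0 5 1).map (fun i => pvCell board ((r : Int) + i) (c + i))) pl pl)).sum)
      = ∑ r ∈ Finset.range m, ∑ c ∈ Finset.range m,
          evaluate_line ((PySem.List.pyRange 0 5 1).map (fun i => pvCell board ((r : Int) + i) ((c : Int) + i))) pl pl := by
    refine Finset.sum_congr rfl ?_
    intro r _
    rw [sum_map_pyRange0]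
  rw [hL]
  have hR : (∑ d ∈ Finset.range m,
        (pvSlideLine ((PySem.List.pyRange 0 ((board.length : Int) - (d : Int)) 1).map (fun r => pvCell board r (r + (d : Int)))) pl (3 - pl)
        + (if (d : Int) ≠ 0 then
            pvSlideLine ((PySem.List.pyRange 0 ((board.length : Int) - (d : Int)) 1).map (fun r => pvCell board (r + (d : Int)) r)) pl (3 - pl)
          else 0)))
      = ∑ d ∈ Finset.range m,
          ((∑ k ∈ Finset.range (m - d),
            evaluate_line ((PySem.List.pyRange 0 5 1).map (fun i => pvCell board ((k : Int) + i) (((k + d : ℕ) : Int) + i))) pl pl)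
          + (if d ≠ 0 then
              (∑ k ∈ Finset.range (m - d),
                evaluate_line ((PySem.List.pyRange 0 5 1).map (fun i => pvCell board (((k + d : ℕ) : Int) + i) ((k : Int) + i))) pl pl)
            else 0)) := by
    refine Finset.sum_congr rfl ?_
    intro d hd
    have hdm : d < m := Finset.mem_range.mp hd
    have hmd : (board.length : Int) - (d : Int) - 4 = ((m - d : ℕ) : Int) := by omega
    congr 1
    · rw [pv_slide_as_winsum board pl _ 0 ((board.length : Int) - (d : Int)) (by omega)]
      rw [hmd, sum_map_pyRange0]
      refine Finset.sum_congr rfl ?_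
      intro k _
      have hwin : (fun i => pvCell board ((k : Int) + i) (((k + d : ℕ) : Int) + i))
          = fun i => pvCell board ((k : Int) + i) (((k : Int) + i) + (d : Int)) := by
        funext i; congr 1; push_cast; ring
      rw [eval_eq, hwin]
    · by_cases hd0 : d = 0
      · simp [hd0]
      · rw [if_pos (by exact_mod_cast hd0), if_pos hd0]
        rw [pv_slide_as_winsum board pl _ 0 ((board.length : Int) - (d : Int)) (by omega)]
        rw [hmd, sum_map_pyRange0]
        refine Finset.sum_congr rfl ?_
        intro k _
        have hwin : (fun i => pvCell board (((k + d : ℕ) : Int) + i) ((k : Int) + i))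
            = fun i => pvCell board (((k : Int) + i) + (d : Int)) ((k : Int) + i) := by
          funext i; congr 1; push_cast; ring
        rw [eval_eq, hwin]
  rw [hR]
  have hsplit : ∀ (F : ℕ → ℕ → Int),
      (∑ r ∈ Finset.range m, ∑ c ∈ Finset.range m, F r c)
        = (∑ r ∈ Finset.range m, ∑ c ∈ Finset.range m, (if r ≤ c then F r c else 0))
          + (∑ r ∈ Finset.range m, ∑ c ∈ Finset.range m, (if c < r then F r c else 0)) := by
    intro F
    rw [← Finset.sum_add_distrib]
    refine Finset.sum_congr rfl ?_
    intro r _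
    rw [← Finset.sum_add_distrib]
    refine Finset.sum_congr rfl ?_
    intro c _
    by_cases hrc : r ≤ c
    · rw [if_pos hrc, if_neg (by omega)]; ring
    · rw [if_neg hrc, if_pos (by omega)]; ring
  rw [hsplit]
  rw [sq_upper m, sq_lower m]
  rw [← Finset.sum_add_distrib]

theorem pvR5 : PySem.List.pyRange 0 5 1 = [0, 1, 2, 3, 4] := by decide

theorem fam_anti (board : List (List Int)) (pl : Int) (h : 5 ≤ board.length) :
    ((PySem.List.pyRange 4 ((board.length : Int)) 1).map (fun r =>
      ((PySem.List.pyRange 0 ((board.length : Int) - 4) 1).map (fun c =>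
        evaluate_line ((PySem.List.pyRange 0 5 1).map (fun i => pvCell board (r - i) (c + i))) pl pl)).sum)).sum
    = ((PySem.List.pyRange 4 (2 * (board.length : Int) - 5) 1).map (fun s =>
        pvSlideLine ((PySem.List.pyRange (max 0 (s - (board.length : Int) + 1)) (min ((board.length : Int) - 1) s + 1) 1).map
          (fun r => pvCell board r (s - r))) pl (3 - pl))).sum := by
  obtain ⟨m, hm⟩ : ∃ m : ℕ, (board.length : Int) - 4 = (m : Int) := ⟨board.length - 4, by omega⟩
  have hm1 : 1 ≤ m := by omega
  -- LHS to a double Finset sum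
  rw [sum_map_pyRange' _ 4 ((board.length : Int)) (by omega)]
  have hLn : ((board.length : Int) - 4).toNat = m := by omega
  rw [hLn]
  have hL : (∑ j ∈ Finset.range m, ((PySem.List.pyRange 0 ((board.length : Int) - 4) 1).map (fun c =>
        evaluate_line ((PySem.List.pyRange 0 5 1).map (fun i => pvCell board ((4 : Int) + (j : Int) - i) (c + i))) pl pl)).sum)
      = ∑ j ∈ Finset.range m, ∑ c ∈ Finset.range m,
          evaluate_line ((PySem.List.pyRange 0 5 1).map (fun i => pvCell board ((4 : Int) + (j : Int) - i) ((c : Int) + i))) pl pl := by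
    refine Finset.sum_congr rfl ?_
    intro j _
    rw [hm, sum_map_pyRange0]
  rw [hL]
  -- RHS to a double Finset sum
  rw [sum_map_pyRange' _ 4 (2 * (board.length : Int) - 5) (by omega)]
  have hRn : (2 * (board.length : Int) - 5 - 4).toNat = 2 * m - 1 := by omega
  rw [hRn]
  have hR : (∑ t ∈ Finset.range (2 * m - 1),
        pvSlideLine ((PySem.List.pyRange (max 0 ((4 : Int) + (t : Int) - (board.length : Int) + 1))
            (min ((board.length : Int) - 1) ((4 : Int) + (t : Int)) + 1) 1).map
          (fun r => pvCell board r ((4 : Int) + (t : Int) - r))) pl (3 - pl))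
      = ∑ t ∈ Finset.range (2 * m - 1),
          ∑ i ∈ Finset.range (min m (t + 1) - (t + 1 - m)),
            evaluate_line ((PySem.List.pyRange 0 5 1).map (fun x =>
              pvCell board ((4 : Int) + ((t + 1 - m + i : ℕ) : Int) - x)
                           (((t - (t + 1 - m) - i : ℕ) : Int) + x))) pl pl := by
    refine Finset.sum_congr rfl ?_
    intro t ht
    have htm : t < 2 * m - 1 := Finset.mem_range.mp ht
    have hlo : max 0 ((4 : Int) + (t : Int) - (board.length : Int) + 1) = ((t + 1 - m : ℕ) : Int) := by omega
    have hb4 : min ((board.length : Int) - 1) ((4 : Int) + (t : Int)) + 1 - 4 = ((min m (t + 1) : ℕ) : Int) := by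
      push_cast [Nat.cast_min]; omega
    rw [pv_slide_as_winsum board pl _ _ _ (by omega)]
    rw [sum_map_pyRange' _ _ _ (by omega)]
    have hcnt : (min ((board.length : Int) - 1) ((4 : Int) + (t : Int)) + 1 - 4
        - max 0 ((4 : Int) + (t : Int) - (board.length : Int) + 1)).toNat = min m (t + 1) - (t + 1 - m) := by
      omega
    rw [hcnt]
    refine Finset.sum_congr rfl ?_
    intro i hi
    have him : i < min m (t + 1) - (t + 1 - m) := Finset.mem_range.mp hi
    rw [eval_eq]
    have hAB : ((PySem.List.pyRange 0 5 1).map (fun x =>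
          pvCell board ((4 : Int) + ((t + 1 - m + i : ℕ) : Int) - x) (((t - (t + 1 - m) - i : ℕ) : Int) + x)))
        = ((PySem.List.pyRange 0 5 1).map (fun x =>
            pvCell board (max 0 ((4 : Int) + (t : Int) - (board.length : Int) + 1) + (i : Int) + x)
              ((4 : Int) + (t : Int) - (max 0 ((4 : Int) + (t : Int) - (board.length : Int) + 1) + (i : Int) + x)))).reverse := by
      rw [pvR5]
      simp only [List.map_cons, List.map_nil, List.reverse_cons, List.reverse_nil, List.nil_append,
        List.cons_append, List.cons.injEq, and_true]
      refine ⟨?_, ?_, ?_, ?_, ?_⟩ <;> (congr 1 <;> omega)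
    rw [hAB, List.count_reverse, List.count_reverse]
  rw [hR]
  rw [sq_anti m (fun j c => evaluate_line ((PySem.List.pyRange 0 5 1).map (fun i =>
      pvCell board ((4 : Int) + (j : Int) - i) ((c : Int) + i))) pl pl)]

theorem pv_sum_map_flatMap {α β : Type} (l : List α) (g : α → List β) (f : β → Int) :
    ((l.flatMap g).map f).sum = (l.map (fun d => ((g d).map f).sum)).sum := by
  induction l with
  | nil => rfl
  | cons a t ih => simp [List.flatMap_cons, ih]

theorem pv_main (board : List (List Int)) (player : Int) :
    count_patterns board player = count_patterns_alt board player := by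
  by_cases hsm : (board.length : Int) < 5
  · unfold count_patterns count_patterns_alt
    rw [if_pos hsm]
    have h4 : PySem.List.pyRange 0 ((board.length : Int) - 4) 1 = [] :=
      PySem.List.pyRange_one_eq_nil (by omega)
    have ha : PySem.List.pyRange 4 ((board.length : Int)) 1 = [] :=
      PySem.List.pyRange_one_eq_nil (by omega)
    simp [h4, ha]
  · have hn : 5 ≤ board.length := by omega
    unfold count_patterns count_patterns_alt
    rw [if_neg hsm]
    simp only [PySem.List.foldl_add, PySem.List.foldl_append_singleton_eq_map]
    rw [show (fun (lines : List (List Int)) (d : Int) =>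
          if d ≠ 0 then
            lines ++ [List.map (fun r => pvCell board r (r + d)) (PySem.List.pyRange 0 ((board.length : Int) - d) 1)] ++
              [List.map (fun r => pvCell board (r + d) r) (PySem.List.pyRange 0 ((board.length : Int) - d) 1)]
          else lines ++ [List.map (fun r => pvCell board r (r + d)) (PySem.List.pyRange 0 ((board.length : Int) - d) 1)])
        = (fun (lines : List (List Int)) (d : Int) =>
            lines ++ (List.map (fun r => pvCell board r (r + d)) (PySem.List.pyRange 0 ((board.length : Int) - d) 1) ::
              (if d ≠ 0 then
                [List.map (fun r => pvCell board (r + d) r) (PySem.List.pyRange 0 ((board.length : Int) - d) 1)]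
              else []))) from
        funext fun lines => funext fun d => by by_cases hd : d ≠ 0 <;> simp [hd]]
    rw [PySem.List.foldl_append_eq_flatMap]
    simp only [List.nil_append, List.map_append, List.sum_append, List.map_map]
    rw [pv_sum_map_flatMap]
    simp only [List.map_cons, List.sum_cons]
    have hite : ∀ d : Int,
        ((if d ≠ 0 then
            [List.map (fun r => pvCell board (r + d) r) (PySem.List.pyRange 0 ((board.length : Int) - d) 1)]
          else []).map (fun line => pvSlideLine line player (3 - player))).sum
        = (if d ≠ 0 then
            pvSlideLine (List.map (fun r => pvCell board (r + d) r) (PySem.List.pyRange 0 ((board.length : Int) - d) 1)) player (3 - player)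
          else 0) := by
      intro d
      by_cases hd : d ≠ 0 <;> simp [hd]
    simp only [hite]
    rw [fam_row board player hn, fam_col board player hn, fam_diag board player hn, fam_anti board player hn]
    simp only [Function.comp_def]
    simp only [zero_add, add_assoc]

-- ===== VERDICT (by name: the statement is the Claim_ definition above) =====
theorem count_patterns_spec : Claim_equal_count_patterns := by
  intro board player _ _
  unfold Spec_count_patterns
  exact pv_main board player
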